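-- pv_equiv track=rewrite | github.com/choeyeon/base_algoritms | g.py | answerQuaries
-- ===== SOURCE A (Python) =====
-- def answerQuaries(nums, queries):
--
--     nums.sort()
--     ans = []
--
--     for query in queries:
--         count = 0
--         for num in nums:
--             if query >= num:
--                 query -= num
--                 count += 1
--             else:
--                 break
--         ans.append(count)
--
--     return ans
-- ===== SOURCE B (Python) =====
-- def answerQuaries(nums, queries):
--     # Sort once, build running maxima of prefix sums (monotone even with
--     # negative numbers), then answer each query by binary search.
--     nums.sort()
--     run = []
--     s = 0
--     m = None
--     for x in nums:
--         s += x
--         m = s if m is None or s > m else m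
--         run.append(m)
--     n = len(run)
--     ans = []
--     for q in queries:
--         lo, hi = 0, n
--         while lo < hi:
--             mid = (lo + hi) // 2
--             if run[mid] <= q:
--                 lo = mid + 1
--             else:
--                 hi = mid
--         ans.append(lo)
--     return ans
-- ===== Notes on version B (the rewrite author's own statement) =====
-- stated objective: faster
-- what changed: Replaces the per-query greedy rescan of the sorted list by prefix sums whose running maxima (monotone even with negative numbers) are binary-searched once per query.
import Mathlib
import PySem

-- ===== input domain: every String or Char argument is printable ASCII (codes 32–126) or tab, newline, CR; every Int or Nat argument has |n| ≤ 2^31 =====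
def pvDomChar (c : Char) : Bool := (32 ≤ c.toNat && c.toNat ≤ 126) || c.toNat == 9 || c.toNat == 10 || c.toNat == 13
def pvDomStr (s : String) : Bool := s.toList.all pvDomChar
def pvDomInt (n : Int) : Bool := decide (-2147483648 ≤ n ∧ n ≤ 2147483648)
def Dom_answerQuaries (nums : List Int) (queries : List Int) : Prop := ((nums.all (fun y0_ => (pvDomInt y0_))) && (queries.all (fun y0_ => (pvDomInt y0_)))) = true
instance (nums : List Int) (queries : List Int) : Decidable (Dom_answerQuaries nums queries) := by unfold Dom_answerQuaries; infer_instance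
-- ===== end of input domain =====

-- B answers each query by binary search over the running maxima of the prefix
-- sums of the sorted list instead of A's per-query greedy rescan (asymptotically
-- faster). A sorts its `nums` argument in place; the equivalence proved here is
-- about the return value only.

-- ===== PORT A =====
-- inner loop: for num in nums: if query >= num: query -= num; count += 1 else break
def pvALoop : List Int → Int → Int → Int
  | [], _, count => count
  | num :: t, query, count =>
    if query ≥ num then pvALoop t (query - num) (count + 1) else count

def answerQuaries (nums : List Int) (queries : List Int) : List Int :=
  let s := PySem.List.sorted nums (fun x => x) false
  queries.map (fun query => pvALoop s query 0)

-- ===== PORT B =====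
-- for x in nums: s += x; m = s if m is None or s > m else m; run.append(m)
def pvBuildRun : List Int → Int → Option Int → List Int
  | [], _, _ => []
  | x :: t, s, m =>
    let s' := s + x
    let m' := match m with
      | none => s'
      | some mv => if s' > mv then s' else mv
    m' :: pvBuildRun t s' (some m')

-- while lo < hi: mid = (lo+hi)//2; if run[mid] <= q: lo = mid+1 else hi = mid
-- (lo, hi, mid are nonnegative and mid is always in range, so Nat indices and
-- Nat division are exact here)
def pvBsearch (run : List Int) (q : Int) (lo hi : Nat) : Nat :=
  if _h : lo < hi then
    if run.getD ((lo + hi) / 2) 0 ≤ q then pvBsearch run q ((lo + hi) / 2 + 1) hi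
    else pvBsearch run q lo ((lo + hi) / 2)
  else lo
termination_by hi - lo
decreasing_by all_goals omega

def answerQuaries_alt (nums : List Int) (queries : List Int) : List Int :=
  let s := PySem.List.sorted nums (fun x => x) false
  let run := pvBuildRun s 0 none
  queries.map (fun q => ((pvBsearch run q 0 run.length : Nat) : Int))

-- ===== PRECONDITION & SPEC =====
def Spec_answerQuaries (nums : List Int) (queries : List Int) (out : List Int) : Prop := out = answerQuaries_alt nums queries
instance (nums : List Int) (queries : List Int) (out : List Int) : Decidable (Spec_answerQuaries nums queries out) := by unfold Spec_answerQuaries; infer_instance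

-- ===== CLAIM =====
def Claim_equal_answerQuaries : Prop := ∀ (nums : List Int) (queries : List Int), Dom_answerQuaries nums queries → Spec_answerQuaries nums queries (answerQuaries nums queries)

-- ===== LEMMAS AND PROOFS =====

/-- The greedy count as a pure function of the list and the query. -/
def pvCnt : List Int → Int → Nat
  | [], _ => 0
  | n :: t, q => if n ≤ q then pvCnt t (q - n) + 1 else 0

/-- Number of elements ≤ q. -/
def pvCountLE (l : List Int) (q : Int) : Nat := (l.filter (fun x => decide (x ≤ q))).length

theorem pvALoop_eq_cnt (t : List Int) (q c : Int) : pvALoop t q c = c + (pvCnt t q : Int) := by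
  induction t generalizing q c with
  | nil => simp [pvALoop, pvCnt]
  | cons n t ih =>
    simp only [pvALoop, pvCnt, ge_iff_le]
    by_cases h : n ≤ q
    · simp [h, ih]; ring
    · simp [h]

theorem pvBuildRun_lb (t : List Int) (s m : Int) (y : Int)
    (hy : y ∈ pvBuildRun t s (some m)) : m ≤ y := by
  induction t generalizing s m with
  | nil => simp [pvBuildRun] at hy
  | cons x t ih =>
    simp only [pvBuildRun, List.mem_cons] at hy
    rcases hy with rfl | hy
    · split <;> omega
    · have := ih (s + x) _ hy
      split at this <;> omega

theorem pvCountLE_buildRun (t : List Int) (s m q : Int) (hm : m ≤ q) :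
    pvCountLE (pvBuildRun t s (some m)) q = pvCnt t (q - s) := by
  induction t generalizing s m with
  | nil => simp [pvBuildRun, pvCountLE, pvCnt]
  | cons x t ih =>
    by_cases h : s + x ≤ q
    · have hm' : (if s + x > m then s + x else m) ≤ q := by split <;> omega
      have hx : x ≤ q - s := by omega
      have hih := ih (s + x) (if s + x > m then s + x else m) hm'
      have harg : q - (s + x) = q - s - x := by ring
      rw [harg] at hih
      simp only [pvCountLE] at hih
      simp [pvBuildRun, pvCountLE, pvCnt, hx, hm', hih]
    · -- head > q, and every later element ≥ head, so the count is 0; greedy also 0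
      have hx : ¬ x ≤ q - s := by omega
      simp only [pvCnt, hx, if_neg, not_false_eq_true]
      have : ∀ y ∈ pvBuildRun (x :: t) s (some m), ¬ y ≤ q := by
        intro y hy
        have := pvBuildRun_lb (x :: t) s m y hy
        -- also every element is ≥ the head m' ≥ s + x?  Use lb on tail
        simp only [pvBuildRun, List.mem_cons] at hy
        rcases hy with rfl | hy
        · split <;> omega
        · have h2 := pvBuildRun_lb t (s + x) _ y hy
          split at h2 <;> omega
      simp only [pvCountLE, List.length_eq_zero_iff, List.filter_eq_nil_iff]
      intro y hy
      simpa using this y hy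

theorem pvCountLE_run (t : List Int) (q : Int) :
    pvCountLE (pvBuildRun t 0 none) q = pvCnt t q := by
  cases t with
  | nil => simp [pvBuildRun, pvCountLE, pvCnt]
  | cons x t =>
    by_cases h : x ≤ q
    · have hih := pvCountLE_buildRun t (0 + x) (0 + x) q (by omega)
      have harg : q - (0 + x) = q - x := by ring
      rw [harg] at hih
      simp only [pvCountLE, zero_add] at hih
      simp [pvBuildRun, pvCountLE, pvCnt, h, hih]
    · simp only [pvBuildRun, pvCnt, h, if_neg, not_false_eq_true]
      have hall : ∀ y ∈ pvBuildRun (x :: t) 0 none, ¬ y ≤ q := by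
        intro y hy
        simp only [pvBuildRun, List.mem_cons] at hy
        rcases hy with rfl | hy
        · omega
        · have := pvBuildRun_lb t (0 + x) (0 + x) y hy
          omega
      simp only [pvCountLE, List.length_eq_zero_iff, List.filter_eq_nil_iff]
      intro y hy
      simpa using hall y (by simpa [pvBuildRun] using hy)

/-- The run list is nondecreasing. -/
theorem pvBuildRun_pairwise (t : List Int) (s : Int) (m : Option Int) :
    (pvBuildRun t s m).Pairwise (· ≤ ·) := by
  induction t generalizing s m with
  | nil => simp [pvBuildRun]
  | cons x t ih =>
    simp only [pvBuildRun, List.pairwise_cons]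
    refine ⟨?_, ih _ _⟩
    intro y hy
    have := pvBuildRun_lb t (s + x) _ y hy
    exact this

theorem pvGetD_mono (l : List Int) (hl : l.Pairwise (· ≤ ·)) (i j : Nat)
    (hij : i ≤ j) (hj : j < l.length) : l.getD i 0 ≤ l.getD j 0 := by
  rcases eq_or_lt_of_le hij with rfl | hlt
  · exact le_refl _
  · have hi : i < l.length := lt_trans hlt hj
    rw [List.getD_eq_getElem l 0 hi, List.getD_eq_getElem l 0 hj]
    exact (List.pairwise_iff_getElem.mp hl) i j hi hj hlt

theorem pvBsearch_inv_aux (l : List Int) (q : Int) (hl : l.Pairwise (· ≤ ·)) :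
    ∀ (n lo hi : Nat), hi - lo ≤ n → lo ≤ hi → hi ≤ l.length →
      (∀ i < lo, l.getD i 0 ≤ q) →
      (∀ i, hi ≤ i → i < l.length → q < l.getD i 0) →
      (∀ i < pvBsearch l q lo hi, l.getD i 0 ≤ q) ∧
      (∀ i, pvBsearch l q lo hi ≤ i → i < l.length → q < l.getD i 0) := by
  intro n
  induction n with
  | zero =>
    intro lo hi hfuel hlohi hhi hlow hhigh
    have heq : ¬ lo < hi := by omega
    rw [pvBsearch, dif_neg heq]
    exact ⟨hlow, fun i hge hilen => hhigh i (by omega) hilen⟩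
  | succ n ih =>
    intro lo hi hfuel hlohi hhi hlow hhigh
    by_cases hlt : lo < hi
    · rw [pvBsearch, dif_pos hlt]
      have hmlt : (lo + hi) / 2 < l.length := by omega
      by_cases hmid : l.getD ((lo + hi) / 2) 0 ≤ q
      · rw [if_pos hmid]
        refine ih ((lo + hi) / 2 + 1) hi (by omega) (by omega) hhi ?_ hhigh
        intro i hi'
        by_cases hilo : i < lo
        · exact hlow i hilo
        · exact le_trans (pvGetD_mono l hl i ((lo + hi) / 2) (by omega) hmlt) hmid
      · rw [if_neg hmid]
        refine ih lo ((lo + hi) / 2) (by omega) (by omega) (by omega) hlow ?_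
        intro i hge hilen
        exact lt_of_lt_of_le (by omega : q < l.getD ((lo + hi) / 2) 0)
          (pvGetD_mono l hl ((lo + hi) / 2) i hge hilen)
    · rw [pvBsearch, dif_neg hlt]
      exact ⟨hlow, fun i hge hilen => hhigh i (by omega) hilen⟩

theorem pvBsearch_inv (l : List Int) (q : Int) (hl : l.Pairwise (· ≤ ·))
    (lo hi : Nat) (hlohi : lo ≤ hi) (hhi : hi ≤ l.length)
    (hlow : ∀ i < lo, l.getD i 0 ≤ q)
    (hhigh : ∀ i, hi ≤ i → i < l.length → q < l.getD i 0) :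
    (∀ i < pvBsearch l q lo hi, l.getD i 0 ≤ q) ∧
    (∀ i, pvBsearch l q lo hi ≤ i → i < l.length → q < l.getD i 0) :=
  pvBsearch_inv_aux l q hl (hi - lo) lo hi (le_refl _) hlohi hhi hlow hhigh

theorem pvBsearch_le_aux (l : List Int) (q : Int) :
    ∀ (n lo hi : Nat), hi - lo ≤ n → lo ≤ hi → pvBsearch l q lo hi ≤ hi := by
  intro n
  induction n with
  | zero =>
    intro lo hi hfuel hlohi
    rw [pvBsearch, dif_neg (by omega : ¬ lo < hi)]
    omega
  | succ n ih =>
    intro lo hi hfuel hlohi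
    by_cases hlt : lo < hi
    · rw [pvBsearch, dif_pos hlt]
      by_cases hmid : l.getD ((lo + hi) / 2) 0 ≤ q
      · rw [if_pos hmid]
        exact ih ((lo + hi) / 2 + 1) hi (by omega) (by omega)
      · rw [if_neg hmid]
        exact le_trans (ih lo ((lo + hi) / 2) (by omega) (by omega)) (by omega)
    · rw [pvBsearch, dif_neg hlt]; omega

theorem pvCountLE_of_split (l : List Int) (q : Int) (r : Nat) (hr : r ≤ l.length)
    (hlow : ∀ i < r, l.getD i 0 ≤ q)
    (hhigh : ∀ i, r ≤ i → i < l.length → q < l.getD i 0) :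
    pvCountLE l q = r := by
  induction l generalizing r with
  | nil => simp_all [pvCountLE]
  | cons x t ih =>
    cases r with
    | zero =>
      have hall : ∀ y ∈ x :: t, ¬ y ≤ q := by
        intro y hy
        obtain ⟨i, hi, rfl⟩ := List.mem_iff_getElem.mp hy
        have := hhigh i (Nat.zero_le _) hi
        rw [List.getD_eq_getElem _ 0 hi] at this
        omega
      simp only [pvCountLE, List.length_eq_zero_iff, List.filter_eq_nil_iff]
      intro y hy; simpa using hall y hy
    | succ r' =>
      have hx : x ≤ q := by simpa using hlow 0 (Nat.succ_pos _)
      have h1 : pvCountLE t q = r' := by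
        refine ih r' (by simpa using hr) ?_ ?_
        · intro i hi
          have := hlow (i + 1) (by omega)
          simpa using this
        · intro i hge hilen
          have := hhigh (i + 1) (by omega) (by simpa using Nat.succ_lt_succ hilen)
          simpa using this
      simp only [pvCountLE] at h1
      simp [pvCountLE, hx, h1]

theorem pvBsearch_eq_countLE (l : List Int) (q : Int) (hl : l.Pairwise (· ≤ ·)) :
    pvBsearch l q 0 l.length = pvCountLE l q := by
  have hinv := pvBsearch_inv l q hl 0 l.length (Nat.zero_le _) (le_refl _)
    (by intro i hi; omega) (by intro i hge hilen; omega)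
  have hle : pvBsearch l q 0 l.length ≤ l.length :=
    pvBsearch_le_aux l q (l.length - 0) 0 l.length (le_refl _) (Nat.zero_le _)
  exact (pvCountLE_of_split l q _ hle hinv.1 hinv.2).symm

-- ===== VERDICT =====
theorem answerQuaries_spec : Claim_equal_answerQuaries := by
  intro nums queries _hdom
  unfold Spec_answerQuaries answerQuaries answerQuaries_alt
  simp only
  apply List.map_congr_left
  intro q _hq
  rw [pvALoop_eq_cnt, ← pvCountLE_run, ← pvBsearch_eq_countLE _ _ (pvBuildRun_pairwise _ _ _)]
  ring
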